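-- pv_equiv track=rewrite | github.com/pypi-data/pypi-mirror-225 | packages/sinum/sinum-0.2-py3-none-any.whl/sinum/armstrong.py | listArmstrong
-- ===== SOURCE A (Python) =====
-- def isArmstrong(number) :
--     if type(number) == int :
--         number = abs(number)
--         temp = number
--         digits = len(str(temp))
--         result = 0
--         while number > 0 :
--             result += (number % 10) ** digits
--             number = number // 10
--         return True if temp == result else False
--     else :
--         raise ValueError("Input is not a valid integer.")
--
-- def listArmstrong(limit) :
--     if type(limit) == int :
--         if limit >= 0 :
--             number = 0
--             armstrongList = []
--             while limit > 0 :
--                 if isArmstrong(number) :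
--                     armstrongList.append(number)
--                     limit -= 1
--                 number += 1
--             return armstrongList
--         else :
--             raise ValueError ('Limit must be positive or zero.')
--     else :
--         raise ValueError("Input is not a valid integer.")
-- ===== SOURCE B (Python) =====
-- def _sortedDigits(n):
--     # nondecreasing list of the decimal digits of a nonnegative int
--     if n == 0:
--         return [0]
--     ds = []
--     while n > 0:
--         ds.append(n % 10)
--         n = n // 10
--     ds.sort()
--     return ds
--
-- def _combos(length, lo):
--     # all nondecreasing digit lists of the given length with digits in lo..9
--     if length == 0:
--         return [[]]
--     return [[d] + rest for d in range(lo, 10) for rest in _combos(length - 1, d)]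
--
-- def _powerSum(combo, length):
--     return sum(c ** length for c in combo)
--
-- def listArmstrong(limit):
--     if limit < 0:
--         raise ValueError('Limit must be positive or zero.')
--     # Enumerate digit multisets per digit-count instead of scanning every integer:
--     # a number n with d digits is Armstrong iff the d-th-power sum of its digit
--     # multiset is n itself, so it suffices to check each nondecreasing digit list.
--     # Lengths up to 60 cover every Armstrong number (the largest has 39 digits).
--     found = []
--     for length in range(1, 61):
--         if len(found) >= limit:
--             break
--         hits = sorted(_powerSum(c, length) for c in _combos(length, 0)
--                       if _sortedDigits(_powerSum(c, length)) == c)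
--         found.extend(hits)
--     return found[:limit]
-- ===== Notes on version B (the rewrite author's own statement) =====
-- stated objective: alternative
-- what changed: Instead of scanning every integer 0,1,2,... and testing each for the Armstrong property, B enumerates nondecreasing digit multisets per digit-count, keeps the power-sums whose sorted digit list equals the multiset, and concatenates the per-length sorted hits until enough numbers are found.
import Mathlib
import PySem

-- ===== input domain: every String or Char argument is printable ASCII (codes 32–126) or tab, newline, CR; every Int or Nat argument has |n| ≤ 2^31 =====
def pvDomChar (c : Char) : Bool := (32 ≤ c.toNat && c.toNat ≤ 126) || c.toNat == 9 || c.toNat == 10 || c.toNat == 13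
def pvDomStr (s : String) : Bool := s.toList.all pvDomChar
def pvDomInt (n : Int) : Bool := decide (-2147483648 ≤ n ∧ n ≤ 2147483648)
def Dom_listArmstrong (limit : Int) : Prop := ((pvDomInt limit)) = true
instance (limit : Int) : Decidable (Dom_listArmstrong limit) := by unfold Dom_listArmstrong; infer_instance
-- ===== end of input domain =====

-- B replaces A's one-by-one scan of all integers with an enumeration of nondecreasing
-- digit lists per digit-count (keeping the power-sums whose sorted digit list matches),
-- so it never scans up to the value of the limit-th Armstrong number.

-- ===== PORT A =====
-- the while loop of isArmstrong: 'while number>0: result += (number%10)**digits; number //= 10'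
-- (number is ≥ 0 there, so Nat recursion with fuel n is exact: n//10 < n)
def isArmstrongLoop (fuel : Nat) (n : Nat) (digits : Nat) : Int :=
  match fuel with
  | 0 => 0
  | fuel + 1 =>
    if n = 0 then 0 else ((n % 10 : Nat) : Int) ^ digits + isArmstrongLoop fuel (n / 10) digits

def isArmstrongA (number : Int) : Bool :=
  let number := (number.natAbs : Int)            -- number = abs(number)
  let temp := number
  let digits := (PySem.Int.toChars temp).length  -- digits = len(str(temp))
  let result := isArmstrongLoop number.toNat number.toNat digits  -- fuel n suffices: n//10 < n
  temp == result                                 -- True if temp == result else False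

-- the unbounded 'while limit > 0' search loop, with a fuel guard making it total;
-- fuel 10^60 is never exhausted inside Pre_ (the 89 Armstrong numbers all lie below 10^40)
def listArmstrongLoop (fuel : Nat) (number limit : Int) (acc : List Int) : List Int :=
  match fuel with
  | 0 => acc
  | fuel + 1 =>
    if limit > 0 then
      if isArmstrongA number then
        listArmstrongLoop fuel (number + 1) (limit - 1) (acc ++ [number])
      else
        listArmstrongLoop fuel (number + 1) limit acc
    else acc

def listArmstrong (limit : Int) : List Int :=
  if limit ≥ 0 then listArmstrongLoop (10 ^ 60) 0 limit []
  else []   -- Python raises ValueError here: excluded by Pre_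

-- ===== PORT B =====
-- '_sortedDigits' while loop: digits of n least-significant first (fuel n suffices: n//10 < n)
def sortedDigitsLoop (fuel : Nat) (n : Nat) : List Int :=
  match fuel with
  | 0 => []
  | fuel + 1 =>
    if n = 0 then [] else ((n % 10 : Nat) : Int) :: sortedDigitsLoop fuel (n / 10)

def sortedDigits (n : Int) : List Int :=
  if n = 0 then [0] else PySem.List.sorted (sortedDigitsLoop n.toNat n.toNat) (fun x => x)

-- '_combos': all nondecreasing digit lists of the given length with digits in lo..9
def combos (length : Nat) (lo : Int) : List (List Int) :=
  match length with
  | 0 => [[]]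
  | length + 1 =>
    (PySem.List.pyRange lo 10 1).flatMap (fun d => (combos length d).map (fun rest => d :: rest))

def powerSum (combo : List Int) (length : Nat) : Int :=
  (combo.map (fun c => c ^ length)).sum

-- 'hits = sorted(_powerSum(c, length) for c in _combos(length, 0) if _sortedDigits(_powerSum(c, length)) == c)'
def armstrongOfLength (length : Nat) : List Int :=
  PySem.List.sorted
    (((combos length 0).filter (fun c => sortedDigits (powerSum c length) == c)).map
      (fun c => powerSum c length)) (fun x => x)

-- 'for length in range(1, 61): if len(found) >= limit: break; found.extend(hits)'
def altLoop (length : Nat) (found : List Int) (limit : Int) : List Int :=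
  match length with
  | 0 => found
  | rem + 1 =>
    if (found.length : Int) ≥ limit then found
    else altLoop rem (found ++ armstrongOfLength (61 - (rem + 1))) limit

def listArmstrong_alt (limit : Int) : List Int :=
  -- Python B raises ValueError for limit < 0 (excluded by Pre_); there this port returns []
  PySem.List.slice (altLoop 60 [] limit) none (some limit)

-- ===== PRECONDITION & SPEC =====
-- Pre_ excludes negative limits, on which A raises ValueError, and limits above 89, on which
-- A never returns a value: there are exactly 89 Armstrong numbers, so A's scan loops forever.
def Pre_listArmstrong (limit : Int) : Prop := 0 ≤ limit ∧ limit ≤ 89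
instance (limit : Int) : Decidable (Pre_listArmstrong limit) := by unfold Pre_listArmstrong; infer_instance
def pvWitness_listArmstrong : Int := 11

def Spec_listArmstrong (limit : Int) (out : List Int) : Prop := out = listArmstrong_alt limit
instance (limit : Int) (out : List Int) : Decidable (Spec_listArmstrong limit out) := by unfold Spec_listArmstrong; infer_instance

-- ===== CLAIM (what is proved, stated in full; the proofs are below) =====
def Claim_equal_listArmstrong : Prop := ∀ (limit : Int), Dom_listArmstrong limit → Pre_listArmstrong limit → Spec_listArmstrong limit (listArmstrong limit)

-- ===== LEMMAS AND PROOFS =====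
def ints (a : Int) (f : Nat) : List Int := List.map (fun i : Nat => a + (i : Int)) (List.range f)
theorem ints_zero (a : Int) : ints a 0 = [] := rfl
theorem ints_succ (a : Int) (f : Nat) : ints a (f + 1) = a :: ints (a + 1) f := by
  unfold ints
  rw [List.range_succ_eq_map, List.map_cons, List.map_map]
  refine congrArg₂ _ (by norm_num) (List.map_congr_left ?_)
  intro i hi
  simp only [Function.comp_apply, Nat.succ_eq_add_one]
  push_cast; ring

theorem loop_eq (fuel : Nat) : ∀ (num limit : Int) (acc : List Int),
    listArmstrongLoop fuel num limit acc
      = acc ++ ((ints num fuel).filter isArmstrongA).take limit.toNat := by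
  induction fuel with
  | zero => intro num limit acc; simp [listArmstrongLoop, ints_zero]
  | succ f ih =>
    intro num limit acc
    rw [listArmstrongLoop, ints_succ, List.filter_cons]
    by_cases hl : limit > 0
    · rw [if_pos hl]
      have ht : limit.toNat = (limit - 1).toNat + 1 := by omega
      by_cases ha : isArmstrongA num
      · rw [if_pos ha, if_pos (by simp [ha]), ih, ht, List.take_succ_cons, List.append_assoc,
          List.singleton_append]
      · rw [if_neg ha, if_neg (by simp [ha]), ih]
    · rw [if_neg hl]
      have ht : limit.toNat = 0 := by omega
      simp [ht]

-- the canonical digit list of a Nat, least-significant first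
def digitsN (n : Nat) : List Int :=
  if n = 0 then [] else ((n % 10 : Nat) : Int) :: digitsN (n / 10)
decreasing_by exact Nat.div_lt_self (by omega) (by norm_num)

theorem sortedDigitsLoop_eq (fuel : Nat) : ∀ n : Nat, n ≤ fuel → sortedDigitsLoop fuel n = digitsN n := by
  induction fuel with
  | zero =>
    intro n hn
    have : n = 0 := by omega
    subst this; rw [digitsN]; rfl
  | succ f ih =>
    intro n hn
    rw [sortedDigitsLoop, digitsN]
    by_cases h : n = 0
    · simp [h]
    · rw [if_neg h, if_neg h, ih _ (by have := Nat.div_lt_self (by omega : 0 < n) (by norm_num : 1 < 10); omega)]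

theorem isArmstrongLoop_eq (fuel : Nat) : ∀ (n : Nat) (d : Nat), n ≤ fuel →
    isArmstrongLoop fuel n d = ((digitsN n).map (fun c => c ^ d)).sum := by
  induction fuel with
  | zero =>
    intro n d hn
    have : n = 0 := by omega
    subst this; rw [digitsN]; rfl
  | succ f ih =>
    intro n d hn
    rw [isArmstrongLoop, digitsN]
    by_cases h : n = 0
    · simp [h]
    · rw [if_neg h, if_neg h, List.map_cons, List.sum_cons,
        ih _ _ (by have := Nat.div_lt_self (by omega : 0 < n) (by norm_num : 1 < 10); omega)]

theorem digitsN_mem (n : Nat) : ∀ x ∈ digitsN n, 0 ≤ x ∧ x ≤ 9 := by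
  induction n using Nat.strong_induction_on with
  | _ n ih =>
    intro x hx
    rw [digitsN] at hx
    by_cases h : n = 0
    · simp [h] at hx
    · rw [if_neg h, List.mem_cons] at hx
      rcases hx with rfl | hx
      · constructor <;> [positivity; exact_mod_cast Nat.le_of_lt_succ (by omega : n % 10 < 10)]
      · exact ih (n / 10) (Nat.div_lt_self (by omega) (by norm_num)) x hx

theorem digitsN_len (n : Nat) (h : 0 < n) : (digitsN n).length = Nat.log 10 n + 1 := by
  induction n using Nat.strong_induction_on with
  | _ n ih =>
    rw [digitsN, if_neg (by omega), List.length_cons]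
    by_cases h10 : n < 10
    · have : n / 10 = 0 := by omega
      rw [this, digitsN]
      simp [Nat.log_eq_zero_iff.mpr (Or.inl h10)]
    · have hd : 0 < n / 10 := by omega
      rw [ih (n / 10) (Nat.div_lt_self (by omega) (by norm_num)) hd]
      have := Nat.log_div_base 10 n
      have hpos := Nat.log_pos (by norm_num : 1 < 10) (by omega : 10 ≤ n)
      omega

theorem tdc_len (f : Nat) : ∀ n : Nat, n < f →
    (Nat.toDigitsCore 10 f n []).length = Nat.log 10 n + 1 := by
  induction f with
  | zero => intro n hn; omega
  | succ f ih =>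
    intro n hn
    rw [Nat.toDigitsCore]
    by_cases h : n / 10 = 0
    · have : n < 10 := by omega
      simp [h, Nat.log_eq_zero_iff.mpr (Or.inl this)]
    · rw [if_neg h, Nat.toDigitsCore_lens_eq,
        ih (n / 10) (by have := Nat.div_lt_self (by omega : 0 < n) (by norm_num : 1 < 10); omega)]
      have := Nat.log_div_base 10 n
      have hpos := Nat.log_pos (by norm_num : 1 < 10) (by omega : 10 ≤ n)
      omega

theorem toChars_len (n : Nat) : (PySem.Int.toChars (n : Int)).length = Nat.log 10 n + 1 := by
  rw [PySem.Int.toChars, if_neg (by omega)]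
  simp only [Int.toNat_natCast]
  exact tdc_len (n + 1) n (by omega)

theorem isA_iff (m : Nat) :
    isArmstrongA (m : Int) = true ↔
      (m : Int) = ((digitsN m).map (fun c => c ^ (Nat.log 10 m + 1))).sum := by
  unfold isArmstrongA
  simp only [Int.natAbs_natCast, Int.toNat_natCast, beq_iff_eq]
  rw [isArmstrongLoop_eq m m _ (le_refl m), toChars_len]

theorem sortedDigits_pos (n : Int) (h : 0 < n) :
    sortedDigits n = PySem.List.sorted (digitsN n.toNat) (fun x => x) := by
  rw [sortedDigits, if_neg (by omega), sortedDigitsLoop_eq _ _ (le_refl _)]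

theorem combos_sound (L : Nat) : ∀ (lo : Int) (c : List Int), c ∈ combos L lo →
    c.length = L ∧ ∀ x ∈ c, lo ≤ x ∧ x ≤ 9 := by
  induction L with
  | zero =>
    intro lo c hc
    rw [combos, List.mem_singleton] at hc
    subst hc; exact ⟨rfl, by simp⟩
  | succ L ih =>
    intro lo c hc
    rw [combos, List.mem_flatMap] at hc
    obtain ⟨d, hd, hc⟩ := hc
    rw [List.mem_map] at hc
    obtain ⟨rest, hrest, rfl⟩ := hc
    rw [PySem.List.mem_pyRange_one] at hd
    obtain ⟨hlen, hmem⟩ := ih d rest hrest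
    refine ⟨by simp [hlen], ?_⟩
    intro x hx
    rcases List.mem_cons.mp hx with rfl | hx
    · omega
    · have := hmem x hx; omega

theorem combos_complete (L : Nat) : ∀ (lo : Int) (c : List Int),
    c.Pairwise (· ≤ ·) → c.length = L → (∀ x ∈ c, lo ≤ x ∧ x ≤ 9) → c ∈ combos L lo := by
  induction L with
  | zero =>
    intro lo c _ hlen _
    rw [List.length_eq_zero_iff] at hlen
    subst hlen; rw [combos]; exact List.mem_singleton.mpr rfl
  | succ L ih =>
    intro lo c hpw hlen hmem
    match c with
    | x :: rest =>
      rw [List.pairwise_cons] at hpw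
      rw [combos, List.mem_flatMap]
      have hx := hmem x (List.mem_cons_self)
      refine ⟨x, PySem.List.mem_pyRange_one.mpr ⟨hx.1, by omega⟩, List.mem_map.mpr ⟨rest, ?_, rfl⟩⟩
      refine ih x rest hpw.2 (by simpa using hlen) ?_
      intro y hy
      exact ⟨hpw.1 y hy, (hmem y (List.mem_cons_of_mem _ hy)).2⟩

theorem combos_nodup (L : Nat) : ∀ lo : Int, (combos L lo).Nodup := by
  induction L with
  | zero => intro lo; rw [combos]; exact List.nodup_singleton _
  | succ L ih =>
    intro lo
    rw [combos, List.nodup_flatMap]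
    constructor
    · intro d _
      exact (ih d).map_on (by intro a _ b _ h; exact (List.cons.injEq _ _ _ _ ▸ h).2)
    · refine (PySem.List.pairwise_lt_pyRange_one lo 10).imp ?_
      intro d e hde c hc1 hc2
      rw [List.mem_map] at hc1 hc2
      obtain ⟨r1, _, rfl⟩ := hc1
      obtain ⟨r2, _, he⟩ := hc2
      have : e = d := (List.cons.injEq _ _ _ _ ▸ he).1
      omega

theorem ints_add (a : Int) (f g : Nat) : ints a (f + g) = ints a f ++ ints (a + f) g := by
  unfold ints
  rw [List.range_add, List.map_append, List.map_map]
  refine congrArg _ (List.map_congr_left ?_)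
  intro i hi
  simp only [Function.comp_apply]
  push_cast; ring

theorem mem_ints (a : Int) (f : Nat) (x : Int) : x ∈ ints a f ↔ a ≤ x ∧ x < a + f := by
  unfold ints
  rw [List.mem_map]
  constructor
  · rintro ⟨i, hi, rfl⟩; rw [List.mem_range] at hi; omega
  · rintro ⟨h1, h2⟩
    exact ⟨(x - a).toNat, List.mem_range.mpr (by omega), by omega⟩

theorem ints_pairwise (a : Int) (f : Nat) : (ints a f).Pairwise (· < ·) := by
  unfold ints
  refine List.Pairwise.map _ ?_ (List.pairwise_lt_range)
  intro p q h
  omega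

theorem hits_mem_iff (k : Nat) (hk : 1 ≤ k) (x : Int) :
    x ∈ (((combos (k + 1) 0).filter (fun c => sortedDigits (powerSum c (k + 1)) == c)).map
      (fun c => powerSum c (k + 1)))
    ↔ x ∈ (ints ((10 ^ k : Nat) : Int) (10 ^ (k + 1) - 10 ^ k)).filter isArmstrongA := by
  have hle : (10:Nat)^k ≤ 10^(k+1) := Nat.pow_le_pow_right (by norm_num) (by omega)
  have hbounds : ∀ y : Int, y ∈ ints ((10 ^ k : Nat) : Int) (10 ^ (k + 1) - 10 ^ k) ↔
      ((10^k : Nat) : Int) ≤ y ∧ y < ((10^(k+1) : Nat) : Int) := by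
    intro y
    rw [mem_ints, Nat.cast_sub hle]
    omega
  constructor
  · -- a hit is an Armstrong number of the block
    intro hx
    rw [List.mem_map] at hx
    obtain ⟨c, hc, rfl⟩ := hx
    rw [List.mem_filter, beq_iff_eq] at hc
    obtain ⟨hcm, hsd⟩ := hc
    obtain ⟨hlen, hment⟩ := combos_sound _ _ _ hcm
    set s := powerSum c (k + 1) with hs
    have hs0 : 0 ≤ s := by
      refine List.sum_nonneg ?_
      intro y hy
      rw [List.mem_map] at hy
      obtain ⟨z, hz, rfl⟩ := hy
      exact pow_nonneg (hment z hz).1 _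
    have hspos : 0 < s := by
      by_contra h
      have hseq : s = 0 := by omega
      rw [hseq] at hsd
      simp only [sortedDigits] at hsd
      rw [← hsd] at hlen
      simp at hlen
      omega
    have hsd' : PySem.List.sorted (digitsN s.toNat) (fun x => x) = c := by
      rw [← sortedDigits_pos s hspos]; exact hsd
    have hpc : c.Perm (digitsN s.toNat) := hsd' ▸ PySem.List.sorted_perm _ _ _
    have hstpos : 0 < s.toNat := by omega
    have hdl : (digitsN s.toNat).length = k + 1 := by rw [← hpc.length_eq, hlen]
    have hlog : Nat.log 10 s.toNat = k := by
      have := digitsN_len s.toNat hstpos; omega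
    have hb1 : (10:Nat)^k ≤ s.toNat := by
      rw [← hlog]; exact Nat.pow_log_le_self 10 (by omega)
    have hb2 : s.toNat < 10^(k+1) := by
      rw [← hlog]; exact Nat.lt_pow_succ_log_self (by norm_num) _
    have hxs : s = ((s.toNat : Nat) : Int) := by omega
    have hc1 : ((10^k : Nat) : Int) ≤ (s.toNat : Int) := by exact_mod_cast hb1
    have hc2 : ((s.toNat : Nat) : Int) < ((10^(k+1) : Nat) : Int) := by exact_mod_cast hb2
    rw [List.mem_filter]
    refine ⟨(hbounds s).mpr ⟨by omega, by omega⟩, ?_⟩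
    rw [hxs, isA_iff s.toNat, hlog]
    have hsum : ((digitsN s.toNat).map (fun c => c ^ (k+1))).sum
        = (c.map (fun c => c ^ (k+1))).sum := ((hpc.map _).sum_eq).symm
    rw [hsum, ← hxs]
    exact hs
  · -- an Armstrong number of the block is a hit
    intro hx
    rw [List.mem_filter] at hx
    obtain ⟨hmemb, hA⟩ := hx
    rw [hbounds] at hmemb
    have hx0 : (0:Int) ≤ x := by
      have : (0:Int) ≤ ((10^k : Nat) : Int) := by positivity
      omega
    have hxm : x = (x.toNat : Int) := by omega
    set m := x.toNat with hm
    have hb1 : (10:Nat)^k ≤ m := by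
      have := hmemb.1; rw [hxm] at this; exact_mod_cast this
    have hb2 : m < 10^(k+1) := by
      have := hmemb.2; rw [hxm] at this; exact_mod_cast this
    have hmpos : 0 < m := lt_of_lt_of_le (pow_pos (by norm_num : (0:Nat) < 10) k) hb1
    have hlog : Nat.log 10 m = k := Nat.log_eq_of_pow_le_of_lt_pow hb1 hb2
    have hiA : (m : Int) = ((digitsN m).map (fun c => c ^ (k+1))).sum := by
      have h := (isA_iff m).mp (by rw [← hxm]; exact hA)
      rw [hlog] at h; exact h
    set c := PySem.List.sorted (digitsN m) (fun x => x) with hcdef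
    have hpc : c.Perm (digitsN m) := PySem.List.sorted_perm _ _ _
    have hcm : c ∈ combos (k + 1) 0 := by
      refine combos_complete _ _ _ ?_ ?_ ?_
      · simpa using PySem.List.sorted_pairwise (digitsN m) (fun x => x)
      · rw [hpc.length_eq, digitsN_len m hmpos, hlog]
      · intro y hy
        exact digitsN_mem m y (hpc.subset hy)
    have hps : powerSum c (k + 1) = x := by
      show (c.map _).sum = x
      rw [(hpc.map _).sum_eq, hxm, hiA]
    rw [List.mem_map]
    refine ⟨c, List.mem_filter.mpr ⟨hcm, ?_⟩, hps⟩
    rw [beq_iff_eq, hps, sortedDigits_pos x (by omega)]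

theorem block_eq (k : Nat) (hk : 1 ≤ k) :
    (ints ((10 ^ k : Nat) : Int) (10 ^ (k + 1) - 10 ^ k)).filter isArmstrongA
      = armstrongOfLength (k + 1) := by
  rw [armstrongOfLength]
  refine (PySem.List.sorted_eq_of_perm_of_pairwise_lt _ _ _ ?_ ?_).symm
  · refine (List.perm_ext_iff_of_nodup ?_ ?_).mpr (fun a => (hits_mem_iff k hk a).symm)
    · exact List.Pairwise.imp ne_of_lt
        (List.Pairwise.sublist List.filter_sublist (ints_pairwise _ _))
    · refine List.Nodup.map_on ?_ ((combos_nodup (k+1) 0).filter _)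
      intro c1 h1 c2 h2 heq
      rw [List.mem_filter, beq_iff_eq] at h1 h2
      rw [← h1.2, ← h2.2, heq]
  · simpa using List.Pairwise.sublist List.filter_sublist (ints_pairwise _ _)

def myCat : Nat → List Int
  | 0 => []
  | k + 1 => myCat k ++ armstrongOfLength (k + 1)

set_option maxRecDepth 1000000 in
set_option maxHeartbeats 4000000 in
theorem base_block : (ints 0 10).filter isArmstrongA = armstrongOfLength 1 := by decide

theorem F_eq (k : Nat) (hk : 1 ≤ k) : (ints 0 (10 ^ k)).filter isArmstrongA = myCat k := by
  induction k with
  | zero => omega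
  | succ k ih =>
    by_cases hk1 : 1 ≤ k
    · have hsplit : (10:Nat) ^ (k + 1) = 10 ^ k + (10 ^ (k + 1) - 10 ^ k) := by
        have := Nat.pow_le_pow_right (by norm_num : 1 ≤ 10) (by omega : k ≤ k + 1)
        omega
      rw [hsplit, ints_add, List.filter_append, ih hk1, zero_add, block_eq k hk1, myCat]
    · have : k = 0 := by omega
      subst this
      rw [show ((10:Nat) ^ 1) = 10 from rfl, base_block, myCat, myCat]
      rfl

def tailF : Nat → List Int
  | 0 => []
  | r + 1 => armstrongOfLength (61 - (r + 1)) ++ tailF r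

theorem myCat_tailF (r : Nat) (hr : r ≤ 60) : myCat 60 = myCat (60 - r) ++ tailF r := by
  induction r with
  | zero => simp [tailF]
  | succ r ih =>
    rw [tailF, ih (by omega)]
    have h1 : 61 - (r + 1) = 60 - r := by omega
    have h2 : 60 - r = (60 - (r + 1)) + 1 := by omega
    rw [h1, h2, myCat, List.append_assoc]

theorem tailF_eq_myCat : tailF 60 = myCat 60 := by
  have h := myCat_tailF 60 (le_refl 60)
  rw [show myCat (60 - 60) = [] from rfl, List.nil_append] at h
  exact h.symm

theorem altLoop_take (rem : Nat) : ∀ (found : List Int) (limit : Int), 0 ≤ limit →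
    (altLoop rem found limit).take limit.toNat = (found ++ tailF rem).take limit.toNat := by
  induction rem with
  | zero => intro found limit _; simp [altLoop, tailF]
  | succ r ih =>
    intro found limit h0
    rw [altLoop, tailF]
    by_cases h : (found.length : Int) ≥ limit
    · rw [if_pos h, List.take_append_of_le_length (by omega : limit.toNat ≤ found.length)]
    · rw [if_neg h, ih _ _ h0, List.append_assoc]

theorem final (limit : Int) (h0 : 0 ≤ limit) : listArmstrong limit = listArmstrong_alt limit := by
  obtain ⟨n, rfl⟩ : ∃ n : Nat, limit = (n : Int) := ⟨limit.toNat, by omega⟩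
  have halt := altLoop_take 60 [] (n : Int) (by positivity)
  rw [Int.toNat_natCast] at halt
  rw [listArmstrong, if_pos (by positivity), loop_eq, List.nil_append, Int.toNat_natCast,
    F_eq 60 (by norm_num), listArmstrong_alt, PySem.List.slice_to_natCast, halt,
    List.nil_append, tailF_eq_myCat]

-- ===== VERDICT (by name: the statement is the Claim_ definition above) =====
theorem listArmstrong_spec : Claim_equal_listArmstrong := by
  intro limit _ hPre
  obtain ⟨h0, -⟩ := hPre
  unfold Spec_listArmstrong
  exact final limit h0
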